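-- pv_equiv track=rewrite | github.com/estebancabreraa/hoppers-ai | funciones_adicionales.py | neighbor
-- ===== SOURCE A (Python) =====
-- def neighbor(mat, row, col, radius=1):
--
--     rows, cols = len(mat), len(mat[0])
--     out = []
--
--     for i in range(row - radius - 1, row + radius):
--         row = []
--         for j in range(col - radius - 1, col + radius):
--
--             if 0 <= i < rows and 0 <= j < cols:
--                 row.append(mat[i][j])
--             else:
--                 row.append(0)
--
--         out.append(row)
--
--     return out
-- ===== SOURCE B (Python) =====
-- def neighbor(mat, row, col, radius=1):
--     rows, cols = len(mat), len(mat[0])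
--     size = 2 * radius + 1
--     r0, c0 = row - radius - 1, col - radius - 1
--     lo, hi = max(0, c0), min(cols, c0 + size)
--     zero_row = [0] * size
--
--     def fill(i):
--         if 0 <= i < rows and lo < hi:
--             return [0] * (lo - c0) + mat[i][lo:hi] + [0] * (c0 + size - hi)
--         return list(zero_row)
--
--     return [fill(i) for i in range(r0, r0 + size)]
-- ===== Notes on version B (the rewrite author's own statement) =====
-- stated objective: alternative
-- what changed: Replaces the per-cell in-bounds test inside nested loops by computing the window/matrix intersection once and building each output row as zero-padding ++ a row slice ++ zero-padding.
import Mathlib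
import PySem

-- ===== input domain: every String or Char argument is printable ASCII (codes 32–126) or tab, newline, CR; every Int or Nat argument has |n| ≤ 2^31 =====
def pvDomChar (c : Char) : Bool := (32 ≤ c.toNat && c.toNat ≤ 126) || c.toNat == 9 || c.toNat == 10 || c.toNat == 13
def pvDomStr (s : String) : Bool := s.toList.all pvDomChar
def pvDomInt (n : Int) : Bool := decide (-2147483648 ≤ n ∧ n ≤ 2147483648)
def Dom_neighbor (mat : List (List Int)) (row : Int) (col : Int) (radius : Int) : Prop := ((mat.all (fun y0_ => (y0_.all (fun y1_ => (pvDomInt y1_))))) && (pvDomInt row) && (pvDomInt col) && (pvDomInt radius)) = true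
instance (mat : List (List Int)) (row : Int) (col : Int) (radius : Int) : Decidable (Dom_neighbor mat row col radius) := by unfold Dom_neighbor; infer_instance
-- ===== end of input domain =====

-- B builds each window row by intersecting the window with the matrix once (zero padding ++ slice ++ zero padding)
-- instead of A's per-cell in-bounds test; return-value equivalence, no speed claim.

-- ===== PORT A =====
def neighbor (mat : List (List Int)) (row : Int) (col : Int) (radius : Int) : List (List Int) :=
  let rows : Int := mat.length
  let cols : Int := (mat.headD []).length
  (PySem.List.pyRange (row - radius - 1) (row + radius) 1).map (fun i =>
    (PySem.List.pyRange (col - radius - 1) (col + radius) 1).map (fun j =>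
      if 0 ≤ i ∧ i < rows ∧ 0 ≤ j ∧ j < cols then
        PySem.List.pyGetD (PySem.List.pyGetD mat i []) j 0
      else 0))

-- ===== PORT B =====
def neighbor_alt (mat : List (List Int)) (row : Int) (col : Int) (radius : Int) : List (List Int) :=
  let rows : Int := mat.length
  let cols : Int := (mat.headD []).length
  let size : Int := 2 * radius + 1
  let r0 : Int := row - radius - 1
  let c0 : Int := col - radius - 1
  let lo : Int := max 0 c0
  let hi : Int := min cols (c0 + size)
  let zeroRow : List Int := List.replicate size.toNat 0
  (PySem.List.pyRange r0 (r0 + size) 1).map (fun i =>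
    if 0 ≤ i ∧ i < rows ∧ lo < hi then
      List.replicate (lo - c0).toNat 0
        ++ PySem.List.slice (PySem.List.pyGetD mat i []) (some lo) (some hi)
        ++ List.replicate (c0 + size - hi).toNat 0
    else zeroRow)

-- ===== PRECONDITION & SPEC =====
-- Pre_ excludes exactly the inputs where A raises IndexError: the empty matrix (mat[0]),
-- and ragged matrices where some accessed cell mat[i][j] (j < len(mat[0])) is past row i's end.
def Pre_neighbor (mat : List (List Int)) (row : Int) (col : Int) (radius : Int) : Prop :=
  mat ≠ [] ∧
  ∀ n : Nat, n < mat.length →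
    (row - radius - 1 ≤ (n : Int) ∧ (n : Int) < row + radius ∧
      max 0 (col - radius - 1) < min (((mat.headD []).length : Int)) (col + radius)) →
      min (((mat.headD []).length : Int)) (col + radius) ≤ ((mat.getD n []).length : Int)
instance (mat : List (List Int)) (row : Int) (col : Int) (radius : Int) : Decidable (Pre_neighbor mat row col radius) := by
  unfold Pre_neighbor; infer_instance

def pvWitness_neighbor : List (List Int) × Int × Int × Int := ([[1, 2], [3, 4]], 1, 1, 1)

def Spec_neighbor (mat : List (List Int)) (row : Int) (col : Int) (radius : Int) (out : List (List Int)) : Prop := out = neighbor_alt mat row col radius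
instance (mat : List (List Int)) (row : Int) (col : Int) (radius : Int) (out : List (List Int)) : Decidable (Spec_neighbor mat row col radius out) := by unfold Spec_neighbor; infer_instance

-- ===== CLAIM (what is proved, stated in full; the proofs are below) =====
def Claim_equal_neighbor : Prop := ∀ (mat : List (List Int)) (row : Int) (col : Int) (radius : Int), Dom_neighbor mat row col radius → Pre_neighbor mat row col radius → Spec_neighbor mat row col radius (neighbor mat row col radius)

-- ===== LEMMAS AND PROOFS =====

-- a pyRange-map whose entries are all 0 is a block of zero padding
lemma map_window_zero (a b : Int) (f : Int → Int)
    (h : ∀ j : Int, a ≤ j → j < b → f j = 0) :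
    (PySem.List.pyRange a b).map f = List.replicate (b - a).toNat 0 := by
  have h1 : (PySem.List.pyRange a b).map f
      = List.replicate (PySem.List.pyRange a b).length 0 :=
    List.map_eq_replicate_iff.mpr (by
      intro x hx
      rw [PySem.List.mem_pyRange_one] at hx
      exact h x hx.1 hx.2)
  rw [h1, PySem.List.length_pyRange_one]

-- map of in-range lookups over a pyRange is a slice (middle band of a window row)
lemma map_pyGetD_eq_slice (L : List Int) (lo hi : Int)
    (h0 : 0 ≤ lo) (hlh : lo ≤ hi) (hhl : hi ≤ (L.length : Int)) :
    (PySem.List.pyRange lo hi).map (fun j => PySem.List.pyGetD L j 0)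
      = PySem.List.slice L (some lo) (some hi) := by
  rw [PySem.List.slice_toNat L h0 (by omega)]
  have hstep : (PySem.List.pyRange lo hi).map (fun j => PySem.List.pyGetD L j 0)
      = (PySem.List.pyRange lo ((L.take hi.toNat).length : Int)).map
          (fun j => PySem.List.pyGetD (L.take hi.toNat) j 0) := by
    have hlen : ((L.take hi.toNat).length : Int) = hi := by
      simp [List.length_take]; omega
    rw [hlen]
    apply List.map_congr_left
    intro j hj
    rw [PySem.List.mem_pyRange_one] at hj
    have hj0 : 0 ≤ j := le_trans h0 hj.1
    rw [PySem.List.pyGetD_eq_getElem L 0 hj0 (by omega),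
        PySem.List.pyGetD_eq_getElem (L.take hi.toNat) 0 hj0
          (by simp [List.length_take]; omega)]
    rw [List.getElem_take]
  rw [hstep, PySem.List.map_pyGetD_pyRange' (L.take hi.toNat) 0 h0, List.drop_take]

lemma neighbor_row_eq (mat : List (List Int)) (row col radius : Int)
    (hpre : Pre_neighbor mat row col radius) (i : Int)
    (hi : i ∈ PySem.List.pyRange (row - radius - 1) (row + radius) 1) :
    (PySem.List.pyRange (col - radius - 1) (col + radius) 1).map (fun j =>
        if 0 ≤ i ∧ i < (mat.length : Int) ∧ 0 ≤ j ∧ j < (((mat.headD []).length : Int)) then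
          PySem.List.pyGetD (PySem.List.pyGetD mat i []) j 0
        else 0)
      = (if 0 ≤ i ∧ i < (mat.length : Int) ∧
            max 0 (col - radius - 1) < min (((mat.headD []).length : Int)) (col - radius - 1 + (2 * radius + 1)) then
          List.replicate (max 0 (col - radius - 1) - (col - radius - 1)).toNat 0
            ++ PySem.List.slice (PySem.List.pyGetD mat i [])
                (some (max 0 (col - radius - 1)))
                (some (min (((mat.headD []).length : Int)) (col - radius - 1 + (2 * radius + 1))))
            ++ List.replicate ((col - radius - 1 + (2 * radius + 1)) - min (((mat.headD []).length : Int)) (col - radius - 1 + (2 * radius + 1))).toNat 0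
        else List.replicate (2 * radius + 1).toNat 0) := by
  rw [PySem.List.mem_pyRange_one] at hi
  set rows : Int := (mat.length : Int) with hrows
  set cols : Int := ((mat.headD []).length : Int) with hcols
  set c0 : Int := col - radius - 1 with hc0
  set lo : Int := max 0 c0 with hlo
  set hi2 : Int := min cols (c0 + (2 * radius + 1)) with hhi2
  have hrange : col + radius = c0 + (2 * radius + 1) := by omega
  by_cases hrow : 0 ≤ i ∧ i < rows
  · by_cases hband : lo < hi2
    · -- overlapping band: split the j-range at lo and hi2
      have hlolb : 0 ≤ lo := by omega
      have h1 : (PySem.List.pyRange c0 lo).map (fun j =>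
          if 0 ≤ i ∧ i < rows ∧ 0 ≤ j ∧ j < cols then
            PySem.List.pyGetD (PySem.List.pyGetD mat i []) j 0 else 0)
          = List.replicate (lo - c0).toNat 0 := by
        apply map_window_zero
        intro j hja hjb
        rw [if_neg]; omega
      have h3 : (PySem.List.pyRange hi2 (c0 + (2 * radius + 1))).map (fun j =>
          if 0 ≤ i ∧ i < rows ∧ 0 ≤ j ∧ j < cols then
            PySem.List.pyGetD (PySem.List.pyGetD mat i []) j 0 else 0)
          = List.replicate ((c0 + (2 * radius + 1)) - hi2).toNat 0 := by
        apply map_window_zero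
        intro j hja hjb
        rw [if_neg]; omega
      have hrowlen : hi2 ≤ ((PySem.List.pyGetD mat i []).length : Int) := by
        have hn := hpre.2 i.toNat (by omega)
        have hg : mat.getD i.toNat [] = PySem.List.pyGetD mat i [] := by
          rw [PySem.List.pyGetD_eq_getElem mat [] hrow.1 (by omega),
              List.getD_eq_getElem mat [] (by omega)]
        rw [hg] at hn
        have := hn ⟨by omega, by omega, by omega⟩
        omega
      have h2 : (PySem.List.pyRange lo hi2).map (fun j =>
          if 0 ≤ i ∧ i < rows ∧ 0 ≤ j ∧ j < cols then
            PySem.List.pyGetD (PySem.List.pyGetD mat i []) j 0 else 0)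
          = PySem.List.slice (PySem.List.pyGetD mat i []) (some lo) (some hi2) := by
        have hmid : ∀ j ∈ PySem.List.pyRange lo hi2 1,
            (if 0 ≤ i ∧ i < rows ∧ 0 ≤ j ∧ j < cols then
              PySem.List.pyGetD (PySem.List.pyGetD mat i []) j 0 else 0)
            = PySem.List.pyGetD (PySem.List.pyGetD mat i []) j 0 := by
          intro j hj
          rw [PySem.List.mem_pyRange_one] at hj
          rw [if_pos ⟨hrow.1, hrow.2, by omega, by omega⟩]
        rw [List.map_congr_left hmid]
        exact map_pyGetD_eq_slice _ _ _ hlolb (by omega) hrowlen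
      rw [if_pos ⟨hrow.1, hrow.2, hband⟩, hrange,
          PySem.List.pyRange_one_append c0 lo (c0 + (2 * radius + 1)) (by omega) (by omega),
          PySem.List.pyRange_one_append lo hi2 (c0 + (2 * radius + 1)) (by omega) (by omega),
          List.map_append, List.map_append, h1, h2, h3, List.append_assoc]
    · -- no column overlap: all zeros
      rw [if_neg (by tauto), hrange]
      have hz : (PySem.List.pyRange c0 (c0 + (2 * radius + 1))).map (fun j =>
          if 0 ≤ i ∧ i < rows ∧ 0 ≤ j ∧ j < cols then
            PySem.List.pyGetD (PySem.List.pyGetD mat i []) j 0 else 0)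
          = List.replicate ((c0 + (2 * radius + 1)) - c0).toNat 0 := by
        apply map_window_zero
        intro j hja hjb
        rw [if_neg]; omega
      rw [hz]
      congr 1; omega
  · -- row out of the matrix: all zeros
    rw [if_neg (by tauto), hrange]
    have hz : (PySem.List.pyRange c0 (c0 + (2 * radius + 1))).map (fun j =>
        if 0 ≤ i ∧ i < rows ∧ 0 ≤ j ∧ j < cols then
          PySem.List.pyGetD (PySem.List.pyGetD mat i []) j 0 else 0)
        = List.replicate ((c0 + (2 * radius + 1)) - c0).toNat 0 := by
      apply map_window_zero
      intro j hja hjb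
      rw [if_neg]; tauto
    rw [hz]
    congr 1; omega

-- ===== VERDICT (by name: the statement is the Claim_ definition above) =====
theorem neighbor_spec : Claim_equal_neighbor := by
  intro mat row col radius _hdom hpre
  unfold Spec_neighbor
  simp only [neighbor, neighbor_alt]
  have hend : row + radius = (row - radius - 1) + (2 * radius + 1) := by omega
  rw [← hend]
  apply List.map_congr_left
  intro i hi
  exact neighbor_row_eq mat row col radius hpre i hi
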